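-- pv_equiv track=rewrite | github.com/HU-Lee/BOJ | 백준/Silver/9657. 돌 게임 3/돌 게임 3.py | dp
-- ===== SOURCE A (Python) =====
-- win = {
--     1: "SK", 2: "CY", 3: "SK", 4: "SK"
-- }
--
-- def dp(n):
--     if n in win:
--         return win[n]
--     else:
--         if "CY" in [dp(n-1), dp(n-3), dp(n-4)]:
--             win[n] = "SK"
--         else:
--             win[n] = "CY"
--         return win[n]
-- ===== SOURCE B (Python) =====
-- def dp(n):
--     # Closed form: the losing positions for the player to move repeat with period 7;
--     # CY wins exactly when n % 7 is 0 or 2.  (B does not touch/mutate A's global memo dict.)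
--     return "CY" if n % 7 in (0, 2) else "SK"
-- ===== Notes on version B (the rewrite author's own statement) =====
-- stated objective: faster
-- what changed: Replaced the memoized O(n) recursion over the global win-dict by the O(1) closed-form periodicity of the game: CY wins iff n % 7 is 0 or 2.
-- outside the precondition, e.g. on dp(0): A raises RecursionError, B returns 'CY'
import Mathlib
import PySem

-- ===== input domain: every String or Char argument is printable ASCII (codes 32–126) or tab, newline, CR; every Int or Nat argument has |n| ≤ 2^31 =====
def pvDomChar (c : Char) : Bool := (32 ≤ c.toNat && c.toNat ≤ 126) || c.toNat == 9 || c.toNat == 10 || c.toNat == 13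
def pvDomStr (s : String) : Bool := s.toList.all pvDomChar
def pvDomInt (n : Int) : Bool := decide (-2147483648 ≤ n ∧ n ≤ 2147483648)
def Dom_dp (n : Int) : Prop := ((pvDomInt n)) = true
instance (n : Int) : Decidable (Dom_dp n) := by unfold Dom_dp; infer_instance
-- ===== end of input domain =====

-- B replaces A's memoized O(n) recursion by the O(1) period-7 closed form; A also mutates
-- a module-level memo dict (the equivalence here is about the RETURN value only; B does not mutate it).

-- ===== PORT A =====
-- A's recursion: base cases are the seeded entries of the `win` dict (1,2,3,4); otherwise
-- the branch on whether "CY" occurs among dp(n-1), dp(n-3), dp(n-4), memoized in `win`.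
-- The memo makes A's evaluation linear (each value computed once, from the previous four);
-- the port carries the same memoized evaluation as a sliding window (a,b,c,d) =
-- (win[k], win[k+1], win[k+2], win[k+3]), stepping the SAME recurrence.
def dpFrom (a b c d : String) : Nat → String
  | 0 => d
  | (s+1) => dpFrom b c d (if ([d, b, a].contains "CY") then "SK" else "CY") s

def dp (n : Int) : String :=   -- toNat is exact on Pre_dp (1 ≤ n)
  match n.toNat with
  | 0 => "SK"          -- unreachable under Pre_dp (n = 0 makes Python A recurse forever)
  | 1 => "SK"
  | 2 => "CY"
  | 3 => "SK"
  | (m+4) => dpFrom "SK" "CY" "SK" "SK" m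

-- ===== PORT B =====
def dp_alt (n : Int) : String :=
  if PySem.Int.mod n 7 == 0 || PySem.Int.mod n 7 == 2 then "CY" else "SK"

-- ===== PRECONDITION & SPEC =====
-- Pre_ excludes n ≤ 0, where A's recursion never reaches a base case (RecursionError),
-- and n > 1000, where A's recursion depth exceeds Python's default recursion limit
-- (RecursionError as well); A returns normally on all of 1..1000.
def Pre_dp (n : Int) : Prop := 1 ≤ n ∧ n ≤ 1000
instance (n : Int) : Decidable (Pre_dp n) := by unfold Pre_dp; infer_instance
def pvWitness_dp : Int := (5)
def Spec_dp (n : Int) (out : String) : Prop := out = dp_alt n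
instance (n : Int) (out : String) : Decidable (Spec_dp n out) := by unfold Spec_dp; infer_instance

-- ===== CLAIM (what is proved, stated in full; the proofs are below) =====
def Claim_equal_dp : Prop := ∀ (n : Int), Dom_dp n → Pre_dp n → Spec_dp n (dp n)

-- ===== LEMMAS AND PROOFS =====

-- Proof-side unmemoized form of A's recurrence (same base cases, same step).
def dpNat : Nat → String
  | 0 => "SK"
  | 1 => "SK"
  | 2 => "CY"
  | 3 => "SK"
  | 4 => "SK"
  | (m+5) =>
      if ([dpNat (m+4), dpNat (m+2), dpNat (m+1)].contains "CY") then "SK" else "CY"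

lemma dpNat_step (m : Nat) :
    dpNat (m+5) = if ([dpNat (m+4), dpNat (m+2), dpNat (m+1)].contains "CY") then "SK" else "CY" :=
  rfl

-- One full period of seven consecutive values, by induction on the period index.
lemma dpNat_block (k : Nat) :
    dpNat (7*k+1) = "SK" ∧ dpNat (7*k+2) = "CY" ∧ dpNat (7*k+3) = "SK" ∧
    dpNat (7*k+4) = "SK" ∧ dpNat (7*k+5) = "SK" ∧ dpNat (7*k+6) = "SK" ∧
    dpNat (7*k+7) = "CY" := by
  induction k with
  | zero => refine ⟨rfl, rfl, rfl, rfl, ?_, ?_, ?_⟩ <;> decide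
  | succ k ih =>
    obtain ⟨h1, h2, h3, h4, h5, h6, h7⟩ := ih
    have e8 : dpNat (7*k+8) = "SK" := by
      have h := dpNat_step (7*k+3)
      rw [show 7*k+3+5 = 7*k+8 by ring, show 7*k+3+4 = 7*k+7 by ring,
          show 7*k+3+2 = 7*k+5 by ring, show 7*k+3+1 = 7*k+4 by ring, h7, h5, h4] at h
      simpa using h
    have e9 : dpNat (7*k+9) = "CY" := by
      have h := dpNat_step (7*k+4)
      rw [show 7*k+4+5 = 7*k+9 by ring, show 7*k+4+4 = 7*k+8 by ring,
          show 7*k+4+2 = 7*k+6 by ring, show 7*k+4+1 = 7*k+5 by ring, e8, h6, h5] at h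
      simpa using h
    have e10 : dpNat (7*k+10) = "SK" := by
      have h := dpNat_step (7*k+5)
      rw [show 7*k+5+5 = 7*k+10 by ring, show 7*k+5+4 = 7*k+9 by ring,
          show 7*k+5+2 = 7*k+7 by ring, show 7*k+5+1 = 7*k+6 by ring, e9, h7, h6] at h
      simpa using h
    have e11 : dpNat (7*k+11) = "SK" := by
      have h := dpNat_step (7*k+6)
      rw [show 7*k+6+5 = 7*k+11 by ring, show 7*k+6+4 = 7*k+10 by ring,
          show 7*k+6+2 = 7*k+8 by ring, show 7*k+6+1 = 7*k+7 by ring, e10, e8, h7] at h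
      simpa using h
    have e12 : dpNat (7*k+12) = "SK" := by
      have h := dpNat_step (7*k+7)
      rw [show 7*k+7+5 = 7*k+12 by ring, show 7*k+7+4 = 7*k+11 by ring,
          show 7*k+7+2 = 7*k+9 by ring, show 7*k+7+1 = 7*k+8 by ring, e11, e9, e8] at h
      simpa using h
    have e13 : dpNat (7*k+13) = "SK" := by
      have h := dpNat_step (7*k+8)
      rw [show 7*k+8+5 = 7*k+13 by ring, show 7*k+8+4 = 7*k+12 by ring,
          show 7*k+8+2 = 7*k+10 by ring, show 7*k+8+1 = 7*k+9 by ring, e12, e10, e9] at h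
      simpa using h
    have e14 : dpNat (7*k+14) = "CY" := by
      have h := dpNat_step (7*k+9)
      rw [show 7*k+9+5 = 7*k+14 by ring, show 7*k+9+4 = 7*k+13 by ring,
          show 7*k+9+2 = 7*k+11 by ring, show 7*k+9+1 = 7*k+10 by ring, e13, e11, e10] at h
      simpa using h
    refine ⟨?_, ?_, ?_, ?_, ?_, ?_, ?_⟩
    · rw [show 7*(k+1)+1 = 7*k+8 by ring]; exact e8
    · rw [show 7*(k+1)+2 = 7*k+9 by ring]; exact e9
    · rw [show 7*(k+1)+3 = 7*k+10 by ring]; exact e10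
    · rw [show 7*(k+1)+4 = 7*k+11 by ring]; exact e11
    · rw [show 7*(k+1)+5 = 7*k+12 by ring]; exact e12
    · rw [show 7*(k+1)+6 = 7*k+13 by ring]; exact e13
    · rw [show 7*(k+1)+7 = 7*k+14 by ring]; exact e14

-- The sliding window computes the same values as the plain recurrence.
lemma dpFrom_eq (s : Nat) : ∀ k : Nat,
    dpFrom (dpNat (k+1)) (dpNat (k+2)) (dpNat (k+3)) (dpNat (k+4)) s = dpNat (k+4+s) := by
  induction s with
  | zero => intro k; rfl
  | succ s ih =>
    intro k
    show dpFrom (dpNat (k+2)) (dpNat (k+3)) (dpNat (k+4))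
        (if ([dpNat (k+4), dpNat (k+2), dpNat (k+1)].contains "CY") then "SK" else "CY") s
        = dpNat (k+4+(s+1))
    rw [← dpNat_step k]
    have h := ih (k+1)
    rw [show k+1+4 = k+5 by ring, show k+1+4+s = k+5+s by ring] at h
    rw [h, show k+5+s = k+4+(s+1) by ring]

lemma dp_eq_dpNat (n : Int) : dp n = dpNat n.toNat := by
  unfold dp
  split
  · rename_i h; rw [h]; rfl
  · rename_i h; rw [h]; rfl
  · rename_i h; rw [h]; rfl
  · rename_i h; rw [h]; rfl
  · rename_i m h
    rw [h]
    have h0 := dpFrom_eq m 0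
    have e1 : dpNat (0+1) = "SK" := rfl
    have e2 : dpNat (0+2) = "CY" := rfl
    have e3 : dpNat (0+3) = "SK" := rfl
    have e4 : dpNat (0+4) = "SK" := rfl
    rw [e1, e2, e3, e4, show 0+4+m = m+3+1 by ring] at h0
    exact h0

lemma dpNat_closed (m : Nat) (hm : 1 ≤ m) :
    dpNat m = if m % 7 = 0 ∨ m % 7 = 2 then "CY" else "SK" := by
  obtain ⟨k, r, hr, hme⟩ : ∃ k r, r < 7 ∧ m = 7*k + (r+1) :=
    ⟨(m-1)/7, (m-1)%7, Nat.mod_lt _ (by omega), by omega⟩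
  have hb := dpNat_block k
  obtain ⟨h1, h2, h3, h4, h5, h6, h7⟩ := hb
  subst hme
  interval_cases r <;> simp_all

-- ===== VERDICT (by name: the statement is the Claim_ definition above) =====
theorem dp_spec : Claim_equal_dp := by
  intro n _ hpre
  obtain ⟨h1, _⟩ := hpre
  unfold Spec_dp dp_alt
  rw [dp_eq_dpNat]
  have hm1 : 1 ≤ n.toNat := by omega
  have hcast : (n.toNat : Int) = n := by omega
  rw [dpNat_closed n.toNat hm1]
  have hmod : PySem.Int.mod n 7 = ((n.toNat % 7 : Nat) : Int) := by
    rw [← hcast]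
    exact_mod_cast PySem.Int.mod_natCast n.toNat 7
  rw [hmod]
  by_cases h0 : n.toNat % 7 = 0
  · simp [h0]
  · by_cases h2 : n.toNat % 7 = 2
    · simp [h2]
    · simp only [h0, h2, or_self, if_false]
      simp
      omega
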